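-- pv_equiv track=rewrite | github.com/shengchaohua/shiyanlou-project | classic-algorithm-in-action/classic-algorithm-solution-in-python/CompareStrings.py | compareStrings
-- ===== SOURCE A (Python) =====
-- def compareStrings(A, B):
--     if len(A) < len(B):
--         return False
--
--     import collections
--     letters = collections.Counter(A)
--
--     for b in B:
--         if b not in letters:
--             return False
--         elif letters[b] <= 0:
--             return False
--         else:
--             letters[b] -= 1
--     return True
-- ===== SOURCE B (Python) =====
-- def compareStrings(A, B):
--     sa = sorted(A)
--     sb = sorted(B)
--     i = 0
--     n = len(sa)
--     for b in sb:
--         while i < n and sa[i] < b: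
--             i += 1
--         if i == n or sa[i] != b:
--             return False
--         i += 1
--     return True
-- ===== Notes on version B (the rewrite author's own statement) =====
-- stated objective: alternative
-- what changed: Replaces A's frequency-counter (Counter build + per-char decrement loop with membership/count branches and a length guard) by sorting both strings and checking sub-multiset inclusion with a single two-pointer merge scan over the sorted sequences; no counting structure is used at all.
import Mathlib
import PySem

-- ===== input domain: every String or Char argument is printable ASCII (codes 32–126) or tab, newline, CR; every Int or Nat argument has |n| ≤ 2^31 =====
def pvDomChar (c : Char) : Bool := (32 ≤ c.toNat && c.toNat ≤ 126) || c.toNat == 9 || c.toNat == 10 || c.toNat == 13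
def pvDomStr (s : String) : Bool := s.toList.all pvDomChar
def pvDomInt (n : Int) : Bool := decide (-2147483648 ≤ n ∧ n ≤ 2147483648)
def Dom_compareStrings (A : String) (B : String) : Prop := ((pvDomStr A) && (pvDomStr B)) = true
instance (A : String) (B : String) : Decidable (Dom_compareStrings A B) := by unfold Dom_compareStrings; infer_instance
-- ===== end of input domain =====

-- B replaces A's Counter-decrement loop by sorting both strings and a two-pointer merge scan (alternative algorithm, equal value).

-- ===== PORT A =====
-- the 'for b in B' loop with its two early returns and the in-place counter decrement
def pvGoA (letters : PySem.Dict Char Int) : List Char → Bool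
  | [] => true
  | b :: rest =>
    if letters.contains b = false then false
    else if letters.getD b 0 ≤ 0 then false
    else pvGoA (letters.insert b (letters.getD b 0 - 1)) rest

def compareStrings (A : String) (B : String) : Bool :=
  if PySem.Str.len A < PySem.Str.len B then false
  else pvGoA (PySem.Dict.counter A.toList) B.toList

-- ===== PORT B =====
-- two-pointer merge scan over the two sorted character sequences: for each b of sorted B,
-- the inner 'while sa[i] < b: i += 1' skips smaller chars of sorted A, then sa[i] must equal b
def pvGoB : List Char → List Char → Bool
  | _, [] => true
  | [], _ :: _ => false
  | a :: as, b :: bs =>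
      if a < b then pvGoB as (b :: bs)         -- the while-loop step: skip sa[i]
      else if a = b then pvGoB as bs           -- match: consume both, i += 1
      else false                               -- sa[i] > b: 'sa[i] != b', return False

def compareStrings_alt (A : String) (B : String) : Bool :=
  pvGoB (PySem.List.sorted A.toList (fun x => x) false)
        (PySem.List.sorted B.toList (fun x => x) false)

-- ===== PRECONDITION & SPEC =====
def Spec_compareStrings (A : String) (B : String) (out : Bool) : Prop := out = compareStrings_alt A B
instance (A : String) (B : String) (out : Bool) : Decidable (Spec_compareStrings A B out) := by unfold Spec_compareStrings; infer_instance

-- ===== CLAIM (what is proved, stated in full; the proofs are below) =====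
def Claim_equal_compareStrings : Prop := ∀ (A : String) (B : String), Dom_compareStrings A B → Spec_compareStrings A B (compareStrings A B)

-- ===== LEMMAS AND PROOFS =====

-- invariant characterisation of A's loop: with the counter holding la.count c - pre.count c for every c
-- (keys = chars of la), the loop succeeds iff every char of rest fits into what is left of la
lemma pvGoA_iff (la : List Char) :
    ∀ (rest pre : List Char) (d : PySem.Dict Char Int),
      (∀ c, d.contains c = decide (c ∈ la)) →
      (∀ c, d.getD c 0 = (la.count c : Int) - (pre.count c : Int)) →
      (pvGoA d rest = true ↔ ∀ c ∈ rest, pre.count c + rest.count c ≤ la.count c) := by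
  intro rest
  induction rest with
  | nil => intro pre d _ _; simp [pvGoA]
  | cons b r ih =>
    intro pre d hk hv
    by_cases hb : b ∈ la
    · have hc : d.contains b = true := by rw [hk]; simp [hb]
      by_cases hle : (la.count b : Int) ≤ (pre.count b : Int)
      · have : d.getD b 0 ≤ 0 := by rw [hv]; omega
        simp only [pvGoA, hc, this]
        constructor
        · intro h; simp at h
        · intro h
          have := h b (by simp)
          have hcnt : (1:Nat) ≤ (b :: r).count b := by simp
          omega
      · have hlt : (pre.count b : Int) < (la.count b : Int) := by omega
        have hpos : ¬ d.getD b 0 ≤ 0 := by rw [hv]; omega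
        rw [show pvGoA d (b :: r) = pvGoA (d.insert b (d.getD b 0 - 1)) r from by
          simp [pvGoA, hc, hpos]]
        have hk' : ∀ c, (d.insert b (d.getD b 0 - 1)).contains c = decide (c ∈ la) := by
          intro c
          rw [PySem.Dict.contains_insert, hk]
          by_cases h : c = b <;> simp [h, hb]
        have hv' : ∀ c, (d.insert b (d.getD b 0 - 1)).getD c 0
            = (la.count c : Int) - ((pre ++ [b]).count c : Int) := by
          intro c
          rw [PySem.Dict.getD_insert]
          by_cases h : c = b
          · rw [if_pos h, h, hv]
            have hcnt : (pre ++ [b]).count b = pre.count b + 1 := by simp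
            rw [hcnt]; push_cast; ring
          · rw [if_neg h, hv]
            have hcnt : (pre ++ [b]).count c = pre.count c := by
              simp [Ne.symm h]
            rw [hcnt]
        rw [ih (pre ++ [b]) _ hk' hv']
        constructor
        · intro h c hc
          rcases List.mem_cons.mp hc with rfl | hc
          · by_cases hbr : c ∈ r
            · have := h c hbr
              simp [List.count_append, List.count_cons] at *
              omega
            · have h0 : r.count c = 0 := List.count_eq_zero.mpr hbr
              simp [h0]
              omega
          · have := h c hc
            simp [List.count_append, List.count_cons] at *
            by_cases hcb : c = b <;> simp [hcb] at * <;> omega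
        · intro h c hc
          have := h c (by simp [hc])
          simp [List.count_append, List.count_cons] at *
          by_cases hcb : c = b <;> simp [hcb] at * <;> omega
    · have hc : d.contains b = false := by rw [hk]; simp [hb]
      simp only [pvGoA, hc]
      constructor
      · intro h; simp at h
      · intro h
        have := h b (by simp)
        have h0 : la.count b = 0 := List.count_eq_zero.mpr hb
        have hcnt : (1:Nat) ≤ (b :: r).count b := by simp
        omega

-- the merge scan on a sorted first list decides the sublist relation
lemma pvGoB_iff_sublist : ∀ (sa sb : List Char), sa.Pairwise (· ≤ ·) →
    (pvGoB sa sb = true ↔ sb.Sublist sa) := by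
  intro sa
  induction sa with
  | nil =>
    intro sb _
    cases sb with
    | nil => simp [pvGoB]
    | cons b bs => simp [pvGoB]
  | cons a as ih =>
    intro sb ha
    have has : as.Pairwise (· ≤ ·) := ha.tail
    cases sb with
    | nil => simp [pvGoB]
    | cons b bs =>
      by_cases hlt : a < b
      · rw [show pvGoB (a :: as) (b :: bs) = pvGoB as (b :: bs) from by simp [pvGoB, hlt]]
        rw [ih (b :: bs) has]
        constructor
        · exact fun h => h.cons a
        · intro h
          cases h with
          | cons _ h' => exact h'
          | cons₂ => exact absurd hlt (lt_irrefl _)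
      · by_cases heq : a = b
        · rw [show pvGoB (a :: as) (b :: bs) = pvGoB as bs from by simp [pvGoB, heq]]
          rw [ih bs has]
          subst heq
          exact (List.cons_sublist_cons).symm
        · have hba : b < a := lt_of_le_of_ne (not_lt.mp hlt) (Ne.symm heq)
          rw [show pvGoB (a :: as) (b :: bs) = false from by simp [pvGoB, hlt, heq]]
          constructor
          · intro h; simp at h
          · intro h
            have hmem : b ∈ a :: as := h.subset (by simp)
            rcases List.mem_cons.mp hmem with rfl | hmem
            · exact absurd hba (lt_irrefl b)
            · have := (List.pairwise_cons.mp ha).1 b hmem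
              exact absurd hba (not_lt.mpr this)

-- sorted-sublist form of sub-multiset inclusion
lemma sorted_sublist_iff_subperm (la lb : List Char) :
    (PySem.List.sorted lb (fun x => x) false).Sublist (PySem.List.sorted la (fun x => x) false)
      ↔ lb.Subperm la := by
  constructor
  · intro h
    have p1 : lb.Perm (PySem.List.sorted lb (fun x => x) false) :=
      (PySem.List.sorted_perm ..).symm
    have p2 : (PySem.List.sorted la (fun x => x) false).Perm la := PySem.List.sorted_perm ..
    exact (p1.subperm.trans h.subperm).trans p2.subperm
  · intro h
    have h' : (PySem.List.sorted lb (fun x => x) false).Subperm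
        (PySem.List.sorted la (fun x => x) false) := by
      have p1 : (PySem.List.sorted lb (fun x => x) false).Perm lb := PySem.List.sorted_perm ..
      have p2 : la.Perm (PySem.List.sorted la (fun x => x) false) :=
        (PySem.List.sorted_perm ..).symm
      exact (p1.subperm.trans h).trans p2.subperm
    rcases h' with ⟨l', hperm, hsub⟩
    have hl'sorted : l'.Pairwise (· ≤ ·) :=
      (PySem.List.sorted_pairwise (xs := la) (key := fun x => x)).sublist hsub
    have : l' = PySem.List.sorted lb (fun x => x) false :=
      PySem.List.eq_of_perm_of_pairwise_le_of_injective (key := fun x => x)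
        (fun _ _ hh => hh) hperm hl'sorted
        (PySem.List.sorted_pairwise (xs := lb) (key := fun x => x))
    rwa [this] at hsub

-- covering every count forces len lb ≤ len la
lemma length_le_of_count_le (la lb : List Char)
    (h : ∀ c ∈ lb, lb.count c ≤ la.count c) : lb.length ≤ la.length := by
  have hle : lb.Subperm la := List.subperm_ext_iff.mpr h
  exact hle.length_le

-- ===== VERDICT (by name: the statement is the Claim_ definition above) =====
theorem compareStrings_spec : Claim_equal_compareStrings := by
  intro A B _
  unfold Spec_compareStrings compareStrings compareStrings_alt
  set la := A.toList
  set lb := B.toList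
  have halt : pvGoB (PySem.List.sorted la (fun x => x) false)
      (PySem.List.sorted lb (fun x => x) false) = true ↔ ∀ c ∈ lb, lb.count c ≤ la.count c := by
    rw [pvGoB_iff_sublist _ _ (PySem.List.sorted_pairwise (xs := la) (key := fun x => x)),
        sorted_sublist_iff_subperm, List.subperm_ext_iff]
  rw [Bool.eq_iff_iff]
  by_cases hlen : PySem.Str.len A < PySem.Str.len B
  · simp only [hlen, if_true]
    rw [halt]
    constructor
    · intro h; simp at h
    · intro h
      exfalso
      have := length_le_of_count_le la lb h
      have hA : PySem.Str.len A = (la.length : Int) := by simp [PySem.Str.len_eq, la]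
      have hB : PySem.Str.len B = (lb.length : Int) := by simp [PySem.Str.len_eq, lb]
      rw [hA, hB] at hlen; omega
  · simp only [hlen, if_false]
    rw [halt,
        pvGoA_iff la lb [] (PySem.Dict.counter la)
          (fun c => by simp [PySem.Dict.contains_counter])
          (fun c => by simp [PySem.Dict.getD_counter])]
    simp
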